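-- pv_equiv track=rewrite | github.com/AdityaRavipati/algo-ds | highest_repeated_values_in_string.py | strings
-- ===== SOURCE A (Python) =====
-- def strings(keywords, sentences):
--     sen_list = []
--     res_dict = {}
--     res_keywords = []
--
--     for sen in sentences:
--         sen_list.append(sen.split())
--
--     for key in keywords:
--         count = 0
--         for sen in sen_list:
--             for i in range(len(sen)):
--                 if key==sen[i]:
--                     count+=1
--         res_dict[key] = count
--
--     res_keys = sorted(res_dict.values())
--     max_value1 = max(res_keys)
--     res_keys.pop()
--     max_value2 = max(res_keys)
--
--     for key, value in res_dict.items():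
--         if value == max_value1 or value == max_value2:
--             res_keywords.append(key)
--     return res_keywords
--
-- keywords = ['accept', 'lazy', 'poor']
--
-- sentences = ["I am aditya I accept my name",
--              "I am a very lazy fellow lazy lazy lazy",
--              "I am poor in coding I accept my poor poor"]
-- ===== SOURCE B (Python) =====
-- def strings(keywords, sentences):
--     # one frequency table over all tokens, then a single top-two scan for the threshold
--     freq = {}
--     for sen in sentences:
--         for w in sen.split():
--             freq[w] = freq.get(w, 0) + 1
--
--     counts = {}
--     for key in keywords:
--         counts[key] = freq.get(key, 0)
--
--     vals = list(counts.values())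
--     if len(vals) < 2:
--         raise ValueError("need at least two distinct keywords")
--     a, b = vals[0], vals[1]
--     best, second = (a, b) if a >= b else (b, a)
--     for v in vals[2:]:
--         if v > best:
--             best, second = v, best
--         elif v > second:
--             second = v
--
--     return [k for k, v in counts.items() if v >= second]
-- ===== Notes on version B (the rewrite author's own statement) =====
-- stated objective: faster
-- what changed: B builds one global token-frequency table in a single pass and looks each keyword up in it (instead of A's rescan of every token list per keyword), and replaces A's sort/pop/double-max selection by a single linear top-two scan that yields the threshold directly.
-- outside the precondition, e.g. on strings(['a'], ['a b']): A raises ValueError, B raises ValueError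
import Mathlib
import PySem

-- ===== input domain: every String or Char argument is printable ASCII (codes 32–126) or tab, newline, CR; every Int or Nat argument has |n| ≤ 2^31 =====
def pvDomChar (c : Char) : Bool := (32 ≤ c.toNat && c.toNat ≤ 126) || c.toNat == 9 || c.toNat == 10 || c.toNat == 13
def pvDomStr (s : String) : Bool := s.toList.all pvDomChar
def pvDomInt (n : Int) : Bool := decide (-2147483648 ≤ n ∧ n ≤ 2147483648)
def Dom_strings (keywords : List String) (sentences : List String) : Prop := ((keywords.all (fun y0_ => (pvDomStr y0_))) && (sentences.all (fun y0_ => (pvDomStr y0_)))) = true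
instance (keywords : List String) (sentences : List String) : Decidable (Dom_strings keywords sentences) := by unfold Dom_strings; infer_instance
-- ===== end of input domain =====

-- B replaces A's per-keyword rescan of every token list by one global frequency table
-- built in a single pass, and A's sort/pop/double-max selection by a single top-two scan.

-- ===== PORT A =====
def strings (keywords : List String) (sentences : List String) : List String :=
  let senList := sentences.foldl (fun acc sen => acc ++ [PySem.Str.split₀ sen]) []
  let resDict := keywords.foldl (fun d key =>
      let count := senList.foldl (fun c sen =>
          (PySem.List.pyRange 0 (PySem.List.len sen) 1).foldl
            (fun c i => if key == PySem.List.pyGetD sen i "" then c + 1 else c) c) (0 : Int)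
      d.insert key count) (PySem.Dict.empty : PySem.Dict String Int)
  let resKeys := PySem.List.sorted resDict.values (fun v => v) false
  match PySem.List.max? resKeys (fun v => v) with
  | none => []  -- Python: max([]) raises ValueError; excluded by Pre_
  | some max1 =>
    match PySem.List.pop? resKeys with
    | none => []  -- Python: pop from empty list raises IndexError; excluded by Pre_
    | some (_, resKeys') =>
      match PySem.List.max? resKeys' (fun v => v) with
      | none => []  -- Python: max([]) raises ValueError; excluded by Pre_
      | some max2 =>
        resDict.items.foldl
          (fun acc kv => if kv.2 == max1 || kv.2 == max2 then acc ++ [kv.1] else acc) []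

-- ===== PORT B =====
def strings_alt (keywords : List String) (sentences : List String) : List String :=
  let freq := sentences.foldl (fun f sen =>
      (PySem.Str.split₀ sen).foldl (fun f w => f.insert w (f.getD w 0 + 1)) f)
      (PySem.Dict.empty : PySem.Dict String Int)
  let counts := keywords.foldl (fun d key => d.insert key (freq.getD key (0 : Int)))
      (PySem.Dict.empty : PySem.Dict String Int)
  match counts.values with
  | a :: b :: rest =>
    let init := if a ≥ b then (a, b) else (b, a)
    let r := rest.foldl (fun p v =>
        if v > p.1 then (v, p.1) else if v > p.2 then (p.1, v) else p) init
    (counts.items.filter (fun kv => decide (kv.2 ≥ r.2))).map (fun kv => kv.1)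
  | _ => []  -- Python: raises ValueError; excluded by Pre_

-- ===== PRECONDITION & SPEC =====
-- Pre_ excludes exactly the inputs with fewer than two DISTINCT keywords, on which
-- Python A raises ValueError (max() of an empty sequence); B also raises ValueError there.
def Pre_strings (keywords : List String) (sentences : List String) : Prop :=
  2 ≤ (PySem.List.dedup keywords).length
instance (keywords : List String) (sentences : List String) : Decidable (Pre_strings keywords sentences) := by unfold Pre_strings; infer_instance

def pvWitness_strings : List String × List String :=
  (["accept", "lazy", "poor"], ["I accept lazy lazy"])

def Spec_strings (keywords : List String) (sentences : List String) (out : List String) : Prop := out = strings_alt keywords sentences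
instance (keywords : List String) (sentences : List String) (out : List String) : Decidable (Spec_strings keywords sentences out) := by unfold Spec_strings; infer_instance

-- ===== CLAIM (what is proved, stated in full; the proofs are below) =====
def Claim_equal_strings : Prop := ∀ (keywords : List String) (sentences : List String), Dom_strings keywords sentences → Pre_strings keywords sentences → Spec_strings keywords sentences (strings keywords sentences)

-- ===== LEMMAS AND PROOFS =====


lemma pv_countP_two {α : Type} (l : List α) (p : α → Bool) (a b : α)
    (ha : a ∈ l) (hb : b ∈ l) (hab : a ≠ b) (hpa : p a = true) (hpb : p b = true) :
    2 ≤ l.countP p := by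
  rw [List.countP_eq_length_filter]
  have ha' : a ∈ l.filter p := List.mem_filter.2 ⟨ha, hpa⟩
  have hb' : b ∈ l.filter p := List.mem_filter.2 ⟨hb, hpb⟩
  match h : l.filter p with
  | [] => rw [h] at ha'; simp at ha'
  | [x] => rw [h] at ha' hb'; simp at ha' hb'; exact absurd (ha'.trans hb'.symm) hab
  | x :: y :: t => simp [List.length_cons]

lemma pv_pred2_unique (ys : List Int) (S T : Int)
    (hS1 : ys.countP (fun x => decide (S < x)) ≤ 1)
    (hS2 : 2 ≤ ys.countP (fun x => decide (S ≤ x)))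
    (hT1 : ys.countP (fun x => decide (T < x)) ≤ 1)
    (hT2 : 2 ≤ ys.countP (fun x => decide (T ≤ x))) : S = T := by
  by_contra hne
  rcases lt_or_gt_of_ne hne with h | h
  · have := List.countP_mono_left (l := ys) (p := fun x => decide (T ≤ x)) (q := fun x => decide (S < x))
      (by intro x _ hx; simp at hx ⊢; omega)
    omega
  · have := List.countP_mono_left (l := ys) (p := fun x => decide (S ≤ x)) (q := fun x => decide (T < x))
      (by intro x _ hx; simp at hx ⊢; omega)
    omega


def pvInv (s : List Int) (p q : Int) : Prop :=
  q ≤ p ∧ (∀ x ∈ s, x ≤ p) ∧ 1 ≤ s.countP (fun x => decide (p ≤ x)) ∧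
    s.countP (fun x => decide (q < x)) ≤ 1 ∧ 2 ≤ s.countP (fun x => decide (q ≤ x))

lemma pv_cnt (s : List Int) (v : Int) (r : Int → Bool) :
    (s ++ [v]).countP r = s.countP r + (if r v = true then 1 else 0) := by
  rw [List.countP_append]; simp [List.countP_cons]

lemma pv_cmono (s : List Int) (A B : Int) (h : A ≤ B) :
    s.countP (fun x => decide (B ≤ x)) ≤ s.countP (fun x => decide (A ≤ x)) :=
  List.countP_mono_left (by intro x _ hx; simp at hx ⊢; omega)

lemma pv_cmono' (s : List Int) (A B : Int) (h : A ≤ B) :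
    s.countP (fun x => decide (B < x)) ≤ s.countP (fun x => decide (A < x)) :=
  List.countP_mono_left (by intro x _ hx; simp at hx ⊢; omega)

lemma pv_scan_inv (l : List Int) : ∀ (s : List Int) (p q : Int), pvInv s p q →
    pvInv (s ++ l)
      (l.foldl (fun p v => if v > p.1 then (v, p.1) else if v > p.2 then (p.1, v) else p) (p, q)).1
      (l.foldl (fun p v => if v > p.1 then (v, p.1) else if v > p.2 then (p.1, v) else p) (p, q)).2 := by
  induction l with
  | nil => intro s p q h; simpa using h
  | cons v t ih =>
    intro s p q h
    obtain ⟨hqp, hle, hp1, hq1, hq2⟩ := h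
    have key : pvInv (s ++ [v])
        (if v > p then (v, p) else if v > q then (p, v) else (p, q)).1
        (if v > p then (v, p) else if v > q then (p, v) else (p, q)).2 := by
      split_ifs with h1 h2
      · -- v > p : new (v, p)
        show pvInv (s ++ [v]) v p
        unfold pvInv
        refine ⟨le_of_lt h1, ?_, ?_, ?_, ?_⟩
        · intro x hx; rcases List.mem_append.1 hx with hx | hx
          · exact le_of_lt (lt_of_le_of_lt (hle x hx) h1)
          · simp at hx; omega
        · rw [pv_cnt, if_pos (by simp)]; omega
        · rw [pv_cnt, if_pos (by simp; omega)]
          have h0 : s.countP (fun x => decide (p < x)) = 0 := by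
            rw [List.countP_eq_zero]; intro x hx; simpa using not_lt.2 (hle x hx)
          omega
        · rw [pv_cnt, if_pos (by simp; omega)]; omega
      · -- q < v ≤ p : new (p, v)
        show pvInv (s ++ [v]) p v
        unfold pvInv
        rw [not_lt] at h1
        refine ⟨h1, ?_, ?_, ?_, ?_⟩
        · intro x hx; rcases List.mem_append.1 hx with hx | hx
          · exact hle x hx
          · simp at hx; omega
        · rw [pv_cnt]; omega
        · rw [pv_cnt, if_neg (by simp)]
          have := pv_cmono' s q v (le_of_lt h2)
          omega
        · rw [pv_cnt, if_pos (by simp)]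
          have := pv_cmono s v p h1
          omega
      · -- v ≤ q : unchanged
        show pvInv (s ++ [v]) p q
        unfold pvInv
        rw [not_lt] at h1 h2
        refine ⟨hqp, ?_, ?_, ?_, ?_⟩
        · intro x hx; rcases List.mem_append.1 hx with hx | hx
          · exact hle x hx
          · simp at hx; omega
        · rw [pv_cnt]; omega
        · rw [pv_cnt, if_neg (by simp; omega)]; omega
        · rw [pv_cnt]; omega
    have := ih (s ++ [v]) _ _ key
    rw [List.append_assoc] at this
    simpa using this


lemma pv_countA (key : String) (sentences : List String) :
    (sentences.map PySem.Str.split₀).foldl (fun c sen =>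
        (PySem.List.pyRange 0 (PySem.List.len sen) 1).foldl
          (fun c i => if key == PySem.List.pyGetD sen i "" then c + 1 else c) c) (0 : Int)
      = ((sentences.map PySem.Str.split₀).flatten.count key : Int) := by
  have inner : ∀ (sen : List String) (c : Int),
      (PySem.List.pyRange 0 (PySem.List.len sen) 1).foldl
        (fun c i => if key == PySem.List.pyGetD sen i "" then c + 1 else c) c
      = c + (sen.count key : Int) := by
    intro sen c
    rw [PySem.List.len_eq, PySem.List.foldl_pyRange_zero_pyGetD' sen "" (fun c w => if key == w then c + 1 else c) c]
    rw [PySem.List.foldl_count_if (fun w => key == w) sen c]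
    congr 1
    rw [List.count]
    congr 1
    refine List.countP_congr fun w _ => ?_
    simp only [beq_iff_eq]
    exact eq_comm
  calc (sentences.map PySem.Str.split₀).foldl (fun c sen =>
        (PySem.List.pyRange 0 (PySem.List.len sen) 1).foldl
          (fun c i => if key == PySem.List.pyGetD sen i "" then c + 1 else c) c) (0 : Int)
      = (sentences.map PySem.Str.split₀).foldl (fun c sen => c + (sen.count key : Int)) 0 := by
        exact PySem.List.foldl_congr_mem _ _ _ _ (fun c sen _ => inner sen c)
    _ = ((sentences.map PySem.Str.split₀).flatten.count key : Int) := by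
        rw [PySem.List.foldl_add, List.count_flatten]
        push_cast
        simp [List.map_map, Function.comp_def]


lemma pv_getD_fold (g : String → Int) (l : List String) : ∀ (d : PySem.Dict String Int) (x : String),
    (l.foldl (fun d k => d.insert k (g k)) d).getD x 0 = if x ∈ l then g x else d.getD x 0 := by
  induction l with
  | nil => intro d x; simp
  | cons k t ih =>
    intro d x
    rw [List.foldl_cons, ih]
    by_cases hxt : x ∈ t
    · simp [hxt]
    · by_cases hxk : x = k
      · subst hxk
        simp [hxt, PySem.Dict.getD_insert_self]
      · simp [hxt, hxk, PySem.Dict.getD_insert_of_ne d (g k) 0 hxk]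

lemma pv_items_fold (g : String → Int) (l : List String) :
    (l.foldl (fun d k => d.insert k (g k)) (PySem.Dict.empty : PySem.Dict String Int)).items
      = (PySem.Set.ofList l).map (fun k => (k, g k)) := by
  set d := l.foldl (fun d k => d.insert k (g k)) (PySem.Dict.empty : PySem.Dict String Int) with hd
  have hkeys : d.keys = PySem.Set.ofList l := by
    rw [hd, PySem.Dict.keys_foldl_insert l (fun d k => g k)]
    simp [PySem.Set.update_nil_left]
  have hnodup : d.keys.Nodup := by rw [hkeys]; exact PySem.Set.nodup_ofList l
  rw [PySem.Dict.items_eq_map_keys d hnodup 0, hkeys]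
  refine List.map_congr_left fun k hk => ?_
  have hkl : k ∈ l := (PySem.Set.mem_ofList l k).1 hk
  rw [hd, pv_getD_fold g l, if_pos hkl]

-- ===== VERDICT (by name: the statement is the Claim_ definition above) =====
theorem strings_spec : Claim_equal_strings := by
  intro keywords sentences _hdom hpre
  show strings keywords sentences = strings_alt keywords sentences
  have hsen : sentences.foldl (fun acc sen => acc ++ [PySem.Str.split₀ sen])
      ([] : List (List String)) = sentences.map PySem.Str.split₀ := by
    simpa using PySem.List.foldl_append_singleton_eq_map PySem.Str.split₀ sentences []
  set toks := (sentences.map PySem.Str.split₀).flatten with htoks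
  set c : String → Int := fun k => (toks.count k : Int) with hc
  set dk := PySem.Set.ofList keywords with hdk
  set ys := dk.map c with hys0
  -- the two dicts
  set dA := keywords.foldl (fun d key =>
      d.insert key ((sentences.map PySem.Str.split₀).foldl (fun c sen =>
          (PySem.List.pyRange 0 (PySem.List.len sen) 1).foldl
            (fun c i => if key == PySem.List.pyGetD sen i "" then c + 1 else c) c) (0 : Int)))
      (PySem.Dict.empty : PySem.Dict String Int) with hdA
  set freq := sentences.foldl (fun f sen =>
      (PySem.Str.split₀ sen).foldl (fun f w => f.insert w (f.getD w 0 + 1)) f)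
      (PySem.Dict.empty : PySem.Dict String Int) with hfreq
  set dB := keywords.foldl (fun d key => d.insert key (freq.getD key (0 : Int)))
      (PySem.Dict.empty : PySem.Dict String Int) with hdB
  have hfreqc : freq = PySem.Dict.counter toks := by
    rw [hfreq, htoks, ← PySem.Dict.foldl_insert_getD_add_one_eq_counter, List.foldl_flatten,
        List.foldl_map]
  have hAitems : dA.items = dk.map (fun k => (k, c k)) := by
    rw [hdA, pv_items_fold]
    exact List.map_congr_left fun k _ => by rw [pv_countA k sentences]
  have hBitems : dB.items = dk.map (fun k => (k, c k)) := by
    rw [hdB, pv_items_fold]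
    refine List.map_congr_left fun k _ => ?_
    rw [hfreqc, PySem.Dict.getD_counter]
  have hAvals : dA.values = ys := by
    show dA.items.map Prod.snd = ys
    rw [hAitems, hys0, List.map_map]; rfl
  have hBvals : dB.values = ys := by
    show dB.items.map Prod.snd = ys
    rw [hBitems, hys0, List.map_map]; rfl
  -- length of ys
  have hlen : 2 ≤ ys.length := by
    rw [hys0, List.length_map]
    have := hpre
    rwa [Pre_strings, PySem.List.dedup_eq_ofList] at this
  obtain ⟨a, b, rest, hysab⟩ : ∃ a b rest, ys = a :: b :: rest := by
    match hy : ys with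
    | [] => simp at hlen
    | [x] => simp at hlen
    | a :: b :: rest => exact ⟨a, b, rest, rfl⟩
  -- A side objects
  set zs := PySem.List.sorted ys (fun v => v) false with hzs
  have hzsne : zs ≠ [] := by
    rw [hzs, Ne, PySem.List.sorted_eq_nil_iff]; rw [hysab]; simp
  have hsplit : zs.dropLast ++ [zs.getLast hzsne] = zs := List.dropLast_append_getLast hzsne
  obtain ⟨M, hM⟩ : ∃ M, PySem.List.max? zs (fun v => v) = some M := by
    cases hmx : PySem.List.max? zs (fun v => v) with
    | none => exact absurd ((PySem.List.max?_eq_none_iff zs _).1 hmx) hzsne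
    | some m => exact ⟨m, rfl⟩
  have hpop : PySem.List.pop? zs = some (zs.getLast hzsne, zs.dropLast) := by
    conv_lhs => rw [← hsplit]
    exact PySem.List.pop?_last _ _
  have hdlne : zs.dropLast ≠ [] := by
    have hlzs : zs.length = ys.length := PySem.List.length_sorted ys _ _
    have : zs.dropLast.length = zs.length - 1 := List.length_dropLast
    intro hnil
    rw [hnil] at this
    simp at this
    omega
  obtain ⟨S, hS⟩ : ∃ S, PySem.List.max? zs.dropLast (fun v => v) = some S := by
    cases hmx : PySem.List.max? zs.dropLast (fun v => v) with
    | none => exact absurd ((PySem.List.max?_eq_none_iff _ _).1 hmx) hdlne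
    | some m => exact ⟨m, rfl⟩
  -- facts about M
  have hMmem : M ∈ ys := (PySem.List.mem_sorted ys _ false M).1 (PySem.List.max?_mem hM)
  have hMmax : ∀ y ∈ ys, y ≤ M := fun y hy =>
    PySem.List.max?_isMax hM y ((PySem.List.mem_sorted ys _ false y).2 hy)
  -- pred2 facts about S on ys
  have hSperm : zs.Perm ys := PySem.List.sorted_perm ys _ _
  have hSmax : ∀ y ∈ zs.dropLast, y ≤ S := PySem.List.max?_isMax hS
  have hSmem : S ∈ zs.dropLast := PySem.List.max?_mem hS
  have hSlast : S ≤ zs.getLast hzsne := by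
    have hp := PySem.List.sorted_pairwise ys (fun v => v)
    rw [← hzs, ← hsplit, List.pairwise_append] at hp
    exact hp.2.2 S hSmem _ (List.mem_singleton_self _)
  have hS1 : ys.countP (fun x => decide (S < x)) ≤ 1 := by
    rw [← hSperm.countP_eq, ← hsplit, List.countP_append]
    have h0 : zs.dropLast.countP (fun x => decide (S < x)) = 0 := by
      rw [List.countP_eq_zero]
      intro x hx; simpa using not_lt.2 (hSmax x hx)
    rw [h0]
    simp only [List.countP_cons, List.countP_nil]
    split_ifs <;> omega
  have hS2 : 2 ≤ ys.countP (fun x => decide (S ≤ x)) := by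
    rw [← hSperm.countP_eq, ← hsplit, List.countP_append]
    have h1 : 1 ≤ zs.dropLast.countP (fun x => decide (S ≤ x)) := by
      rw [Nat.one_le_iff_ne_zero, Ne, List.countP_eq_zero]
      intro hz
      exact absurd (le_refl S) (by simpa using hz S hSmem)
    have h2 : ([zs.getLast hzsne].countP fun x => decide (S ≤ x)) = 1 := by
      simp [hSlast]
    omega
  -- B side scan
  set init := (if a ≥ b then (a, b) else (b, a)) with hinit
  set r := rest.foldl (fun p v =>
      if v > p.1 then (v, p.1) else if v > p.2 then (p.1, v) else p) init with hr
  have hinv0 : pvInv [a, b] init.1 init.2 := by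
    unfold pvInv
    rw [hinit]
    rcases lt_or_ge a b with hab | hab
    · rw [if_neg (by omega)]
      refine ⟨le_of_lt hab, ?_, ?_, ?_, ?_⟩
      · intro x hx; simp at hx; rcases hx with rfl | rfl <;> omega
      all_goals
        dsimp only
        simp only [List.countP_cons, List.countP_nil, decide_eq_true_eq]
        split_ifs <;> omega
    · rw [if_pos hab]
      refine ⟨hab, ?_, ?_, ?_, ?_⟩
      · intro x hx; simp at hx; rcases hx with rfl | rfl <;> omega
      all_goals
        dsimp only
        simp only [List.countP_cons, List.countP_nil, decide_eq_true_eq]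
        split_ifs <;> omega
  have hinv : pvInv ys r.1 r.2 := by
    have h := pv_scan_inv rest [a, b] init.1 init.2 hinv0
    rw [Prod.mk.eta] at h
    rw [← hr] at h
    rw [hysab]
    simpa using h
  obtain ⟨hr21, _hle, hr1pos, hr2a, hr2b⟩ := hinv
  -- r.1 ≤ M hence r.2 ≤ M
  have hr1M : r.2 ≤ M := by
    have hpos : 0 < ys.countP (fun x => decide (r.1 ≤ x)) := by omega
    rw [List.countP_pos_iff] at hpos
    obtain ⟨y, hy, hyp⟩ := hpos
    have := hMmax y hy
    simp at hyp
    omega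
  -- S = r.2
  have hSr : S = r.2 := pv_pred2_unique ys S r.2 hS1 hS2 hr2a hr2b
  -- pointwise predicate equality on values of ys
  have hpred : ∀ v ∈ ys, ((v == M || v == S) : Bool) = decide (v ≥ r.2) := by
    intro v hv
    by_cases h1 : v = M
    · have hd : (decide (v ≥ r.2)) = true := decide_eq_true (by rw [h1]; exact hr1M)
      have e1 : (v == M) = true := by simp [h1]
      simp [e1, hd]
    · by_cases h2 : v = S
      · have hd : (decide (v ≥ r.2)) = true := decide_eq_true (by rw [h2, hSr])
        have e2 : (v == S) = true := by simp [h2]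
        simp [e2, hd]
      · have hvS : ¬ (v ≥ r.2) := by
          rw [← hSr]
          intro hle
          have hlt : S < v := lt_of_le_of_ne hle (Ne.symm h2)
          have hM2 : S < M := lt_of_lt_of_le hlt (hMmax v hv)
          have := pv_countP_two ys (fun x => decide (S < x)) v M hv hMmem h1
            (by simpa using hlt) (by simpa using hM2)
          omega
        have e1 : (v == M) = false := by simp [h1]
        have e2 : (v == S) = false := by simp [h2]
        rw [e1, e2, decide_eq_false hvS]
        rfl
  -- now reduce both sides
  show strings keywords sentences = strings_alt keywords sentences
  simp only [strings, strings_alt]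
  rw [hsen]
  rw [← hdA, ← hfreq, ← hdB, hAvals, hBvals, ← hzs]
  rw [hM]; dsimp only
  rw [hpop]; dsimp only
  rw [hS]; dsimp only
  rw [hysab]; dsimp only
  simp only [← hinit, ← hr]
  rw [PySem.List.foldl_append_if (fun kv => kv.2 == M || kv.2 == S) (fun kv => kv.1) dA.items []]
  rw [hAitems, hBitems]
  simp only [List.nil_append]
  congr 1
  refine List.filter_congr fun kv hkv => ?_
  have hv : kv.2 ∈ ys := by
    rw [hys0]
    rcases List.mem_map.1 hkv with ⟨k, hk, rfl⟩
    exact List.mem_map.2 ⟨k, hk, rfl⟩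
  exact hpred kv.2 hv
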